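-- pv_equiv track=rewrite | github.com/MForofontov/Python-functions | iterable_functions/add_strings_to_subsets.py | add_strings_to_subsets
-- ===== SOURCE A (Python) =====
-- from typing import List, Set
--
-- def add_strings_to_subsets(my_list: List[Set[str]], my_strings: List[str]) -> bool:
--     """
--     Clustering algorithm that finds a string in a list of strings in
--     a list of sets and adds the whole list to the set if any string of
--     that list is inside the set.
--
--     Parameters
--     ----------
--     my_list : list of sets
--         The list of sets to add strings to.
--     my_strings : list of str
--         The list of strings to add to the sets.
--
--     Returns
--     -------
--     bool
--         True if any string was added to a set, False otherwise.
--
--     Raises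
--     ------
--     TypeError
--         If my_list is not a list of sets or my_strings is not a list of strings.
--     """
--     if not isinstance(my_list, list) or not all(isinstance(sublist, set) for sublist in my_list):
--         raise TypeError("my_list must be a list of sets")
--     if not isinstance(my_strings, list) or not all(isinstance(s, str) for s in my_strings):
--         raise TypeError("my_strings must be a list of strings")
--
--     found = False
--     for my_string in my_strings:
--         if found:
--             break
--         for sublist in my_list:
--             if my_string in sublist:
--                 sublist.update(my_strings)
--                 found = True
--                 break
--     return found
-- ===== SOURCE B (Python) =====
-- def add_strings_to_subsets(my_list, my_strings):
--     if not isinstance(my_list, list) or not all(isinstance(sublist, set) for sublist in my_list):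
--         raise TypeError("my_list must be a list of sets")
--     if not isinstance(my_strings, list) or not all(isinstance(s, str) for s in my_strings):
--         raise TypeError("my_strings must be a list of strings")
--
--     # One indexing pass: element -> earliest set (in my_list order) containing it.
--     index = {}
--     for sublist in my_list:
--         for element in sublist:
--             if element not in index:
--                 index[element] = sublist
--     found = False
--     for my_string in my_strings:
--         if my_string in index:
--             index[my_string].update(my_strings)
--             found = True
--             break
--     return found
-- ===== Notes on version B (the rewrite author's own statement) =====
-- stated objective: alternative
-- what changed: Replaces the nested scan of all sets per string by a single index-building pass (element -> earliest containing set as a dict) followed by one dict-lookup pass over my_strings.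
import Mathlib
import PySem

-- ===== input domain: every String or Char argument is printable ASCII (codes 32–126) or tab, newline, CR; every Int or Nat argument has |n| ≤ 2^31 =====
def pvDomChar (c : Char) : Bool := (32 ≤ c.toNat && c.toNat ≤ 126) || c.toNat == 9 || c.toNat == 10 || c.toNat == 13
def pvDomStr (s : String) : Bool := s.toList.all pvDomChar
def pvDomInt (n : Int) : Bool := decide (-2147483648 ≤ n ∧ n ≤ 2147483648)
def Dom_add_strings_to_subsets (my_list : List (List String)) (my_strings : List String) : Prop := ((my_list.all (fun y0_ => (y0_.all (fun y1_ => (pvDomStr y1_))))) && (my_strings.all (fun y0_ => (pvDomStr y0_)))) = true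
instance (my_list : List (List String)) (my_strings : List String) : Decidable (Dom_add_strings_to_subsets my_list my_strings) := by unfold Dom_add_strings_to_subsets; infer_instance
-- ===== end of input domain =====

-- B replaces A's per-string scan of all sets by one element->set index pass, then dict lookups (alternative decomposition).
-- A mutates the matched set in place (sublist.update); both Pythons perform the identical mutation,
-- and the equivalence proved here is about the RETURN value.

-- ===== PORT A =====
-- outer loop of A: for my_string in my_strings, break once found; inner loop 'for sublist in my_list: if my_string in sublist' is the any-scan with break
def astsLoopA (my_list : List (List String)) : List String → Bool
  | [] => false
  | s :: rest =>
    if my_list.any (fun sublist => sublist.contains s) then true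
    else astsLoopA my_list rest

def add_strings_to_subsets (my_list : List (List String)) (my_strings : List String) : Bool :=
  astsLoopA my_list my_strings

-- ===== PORT B =====
-- index-building pass of B: insert element -> sublist only if element is not yet a key
def astsIndex (my_list : List (List String)) : PySem.Dict String (List String) :=
  my_list.foldl
    (fun d sublist =>
      sublist.foldl (fun d e => if d.contains e then d else d.insert e sublist) d)
    PySem.Dict.empty

-- lookup loop of B: first string that is a key in the index → True (the Python also updates that set)
def astsLoopB (idx : PySem.Dict String (List String)) : List String → Bool
  | [] => false
  | s :: rest => if idx.contains s then true else astsLoopB idx rest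

def add_strings_to_subsets_alt (my_list : List (List String)) (my_strings : List String) : Bool :=
  astsLoopB (astsIndex my_list) my_strings

-- ===== PRECONDITION & SPEC =====
def Spec_add_strings_to_subsets (my_list : List (List String)) (my_strings : List String) (out : Bool) : Prop := out = add_strings_to_subsets_alt my_list my_strings
instance (my_list : List (List String)) (my_strings : List String) (out : Bool) : Decidable (Spec_add_strings_to_subsets my_list my_strings out) := by unfold Spec_add_strings_to_subsets; infer_instance

-- ===== CLAIM (what is proved, stated in full; the proofs are below) =====
def Claim_equal_add_strings_to_subsets : Prop := ∀ (my_list : List (List String)) (my_strings : List String), Dom_add_strings_to_subsets my_list my_strings → Spec_add_strings_to_subsets my_list my_strings (add_strings_to_subsets my_list my_strings)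

-- ===== LEMMAS AND PROOFS =====

-- the insert-if-absent inner fold: membership of a key is old membership OR membership in the scanned set
theorem astsIndex_inner_contains (sub : List String) (d : PySem.Dict String (List String)) (v : List String) (s : String) :
    (sub.foldl (fun d e => if d.contains e then d else d.insert e v) d).contains s
      = (d.contains s || sub.contains s) := by
  induction sub generalizing d with
  | nil => simp
  | cons e rest ih =>
    simp only [List.foldl_cons, ih]
    by_cases he : d.contains e
    · simp [he]
      by_cases hse : s = e <;> simp_all
    · rw [if_neg he, PySem.Dict.contains_insert]
      by_cases hse : s = e
      · subst hse
        simp [Bool.not_eq_true] at he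
        simp [he]
      · rw [beq_eq_false_iff_ne.mpr hse]
        simp [hse]

-- the outer fold: the index contains s iff some set in my_list contains s
theorem astsIndex_contains (my_list : List (List String)) (s : String) :
    (astsIndex my_list).contains s = my_list.any (fun sublist => sublist.contains s) := by
  unfold astsIndex
  suffices h : ∀ d : PySem.Dict String (List String),
      (my_list.foldl (fun d sublist =>
        sublist.foldl (fun d e => if d.contains e then d else d.insert e sublist) d) d).contains s
        = (d.contains s || my_list.any (fun sublist => sublist.contains s)) by
    simpa using h PySem.Dict.empty
  induction my_list with
  | nil => simp
  | cons sub rest ih =>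
    intro d
    simp only [List.foldl_cons, ih, astsIndex_inner_contains, List.any_cons]
    cases d.contains s <;> simp

theorem astsLoop_eq (my_list : List (List String)) (my_strings : List String) :
    astsLoopA my_list my_strings = astsLoopB (astsIndex my_list) my_strings := by
  induction my_strings with
  | nil => rfl
  | cons s rest ih =>
    simp only [astsLoopA, astsLoopB, astsIndex_contains, ih]

-- ===== VERDICT (by name: the statement is the Claim_ definition above) =====
theorem add_strings_to_subsets_spec : Claim_equal_add_strings_to_subsets := by
  intro my_list my_strings _
  unfold Spec_add_strings_to_subsets add_strings_to_subsets add_strings_to_subsets_alt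
  exact astsLoop_eq my_list my_strings
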